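-- pv_equiv track=rewrite | github.com/namadoa/experiment-python | exercise/app.py | get_raghu_earnings
-- ===== SOURCE A (Python) =====
-- from collections import Counter
--
-- def get_raghu_earnings(items_list, order_list):
--     sizes_count = Counter(items_list)  # dictionary to keep track of shoe sizes
--     earnings = 0  # initialize earnings
--
--     # Process each customer order
--     for size, price in order_list:
--         if sizes_count[size] > 0:  # Check if the shoe size is available
--             sizes_count[size] -= 1  # Reduce the count for the purchased size
--             earnings += int(price)  # Add the price to the earnings
--
--     return earnings  # Return the total earnings
-- ===== SOURCE B (Python) =====
-- from collections import Counter
--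
-- def get_raghu_earnings(items_list, order_list):
--     # Per-size decomposition: an order is fulfilled iff it is among the first
--     # k orders of its size, where k is that size's stock. So for each stocked
--     # size, sum the first k order prices of that size.
--     counts = Counter(items_list)
--     total = 0
--     for size, k in counts.items():
--         prices = [int(price) for s, price in order_list if s == size]
--         total += sum(prices[:k])
--     return total
-- ===== Notes on version B (the rewrite author's own statement) =====
-- stated objective: alternative
-- what changed: Replaces A's single pass over orders with a mutable decrementing counter by a per-size decomposition: for each stocked size (Counter items), collect that size's order prices and add the sum of the first k of them.
import Mathlib
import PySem

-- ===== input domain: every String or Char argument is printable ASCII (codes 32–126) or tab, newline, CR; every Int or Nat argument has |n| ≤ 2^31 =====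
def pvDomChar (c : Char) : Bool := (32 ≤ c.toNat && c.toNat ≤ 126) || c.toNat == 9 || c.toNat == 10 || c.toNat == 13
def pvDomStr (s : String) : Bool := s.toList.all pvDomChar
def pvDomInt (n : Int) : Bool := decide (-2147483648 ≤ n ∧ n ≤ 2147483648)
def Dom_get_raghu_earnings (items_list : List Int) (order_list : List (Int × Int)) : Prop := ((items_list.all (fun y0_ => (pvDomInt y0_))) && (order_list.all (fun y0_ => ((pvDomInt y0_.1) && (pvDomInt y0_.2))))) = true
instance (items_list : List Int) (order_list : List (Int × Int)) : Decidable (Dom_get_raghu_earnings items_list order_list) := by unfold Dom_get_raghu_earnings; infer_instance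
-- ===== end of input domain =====

-- B replaces A's single order-loop with a per-size decomposition (sum of the first k prices of each stocked size); same cost class, alternative algorithm.

-- ===== PORT A =====
def get_raghu_earnings (items_list : List Int) (order_list : List (Int × Int)) : Int :=
  let sizes_count := PySem.Dict.counter items_list
  (order_list.foldl
    (fun (st : PySem.Dict Int Int × Int) sp =>
      if st.1.getD sp.1 0 > 0 then
        (st.1.insert sp.1 (st.1.getD sp.1 0 - 1), st.2 + sp.2)
      else st)
    (sizes_count, 0)).2

-- ===== PORT B =====
def get_raghu_earnings_alt (items_list : List Int) (order_list : List (Int × Int)) : Int :=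
  let counts := PySem.Dict.counter items_list
  counts.items.foldl
    (fun total sk =>
      let prices := (order_list.filter (fun q => q.1 == sk.1)).map (fun q => q.2)
      total + (PySem.List.slice prices none (some sk.2)).sum)
    0

-- ===== PRECONDITION & SPEC =====
def Spec_get_raghu_earnings (items_list : List Int) (order_list : List (Int × Int)) (out : Int) : Prop := out = get_raghu_earnings_alt items_list order_list
instance (items_list : List Int) (order_list : List (Int × Int)) (out : Int) : Decidable (Spec_get_raghu_earnings items_list order_list out) := by unfold Spec_get_raghu_earnings; infer_instance

-- ===== CLAIM (what is proved, stated in full; the proofs are below) =====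
def Claim_equal_get_raghu_earnings : Prop := ∀ (items_list : List Int) (order_list : List (Int × Int)), Dom_get_raghu_earnings items_list order_list → Spec_get_raghu_earnings items_list order_list (get_raghu_earnings items_list order_list)

-- ===== LEMMAS AND PROOFS =====

-- function update on Int → Int
def pvUpd (c : Int → Int) (k v : Int) : Int → Int := fun s => if s = k then v else c s

-- sum of the first k elements (0 if k ≤ 0)
def pvSumTake (k : Int) (l : List Int) : Int := (l.take k.toNat).sum

-- the prices of orders of size s, in arrival order
def pvPrices (s : Int) (orders : List (Int × Int)) : List Int :=
  (orders.filter (fun q => q.1 == s)).map (fun q => q.2)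

-- A's loop, abstracted over the count function
def pvFloop (c : Int → Int) : List (Int × Int) → Int
  | [] => 0
  | (s, p) :: r => if c s > 0 then p + pvFloop (pvUpd c s (c s - 1)) r else pvFloop c r

theorem pvSumTake_nonpos (k : Int) (l : List Int) (h : k ≤ 0) : pvSumTake k l = 0 := by
  unfold pvSumTake
  have : k.toNat = 0 := by omega
  simp [this]

theorem pvSumTake_cons_pos (k p : Int) (l : List Int) (h : 0 < k) :
    pvSumTake k (p :: l) = p + pvSumTake (k - 1) l := by
  unfold pvSumTake
  have : k.toNat = (k - 1).toNat + 1 := by omega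
  rw [this]
  simp [List.take_succ_cons]

theorem pvFloop_A (orders : List (Int × Int)) :
    ∀ (d : PySem.Dict Int Int) (e : Int),
      (orders.foldl
        (fun (st : PySem.Dict Int Int × Int) sp =>
          if st.1.getD sp.1 0 > 0 then
            (st.1.insert sp.1 (st.1.getD sp.1 0 - 1), st.2 + sp.2)
          else st)
        (d, e)).2 = e + pvFloop (fun s => d.getD s 0) orders := by
  induction orders with
  | nil => intro d e; simp [pvFloop]
  | cons q r ih =>
    intro d e
    obtain ⟨s, p⟩ := q
    by_cases h : d.getD s 0 > 0
    · have hc : (fun t => (d.insert s (d.getD s 0 - 1)).getD t 0)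
          = pvUpd (fun t => d.getD t 0) s ((fun t => d.getD t 0) s - 1) := by
        funext t
        simp [pvUpd, PySem.Dict.getD_insert]
      simp only [List.foldl_cons, if_pos h]
      rw [ih (d.insert s (d.getD s 0 - 1)) (e + p), hc]
      simp only [pvFloop, if_pos h]
      ring
    · simp only [List.foldl_cons, if_neg h]
      rw [ih d e]
      simp only [pvFloop, if_neg h]

theorem pvFloop_split (orders : List (Int × Int)) :
    ∀ (c : Int → Int) (s : Int),
      pvFloop c orders = pvSumTake (c s) (pvPrices s orders) + pvFloop (pvUpd c s 0) orders := by
  induction orders with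
  | nil => intro c s; simp [pvFloop, pvPrices, pvSumTake]
  | cons q r ih =>
    intro c s
    obtain ⟨t, p⟩ := q
    by_cases hts : t = s
    · subst hts
      have hpr : pvPrices t ((t, p) :: r) = p :: pvPrices t r := by
        simp [pvPrices]
      by_cases h : c t > 0
      · have h0 : ¬ (pvUpd c t 0 t > 0) := by simp [pvUpd]
        have hud : pvUpd (pvUpd c t (c t - 1)) t 0 = pvUpd c t 0 := by
          funext x; by_cases hx : x = t <;> simp [pvUpd, hx]
        have hsv : pvUpd c t (c t - 1) t = c t - 1 := by simp [pvUpd]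
        simp only [pvFloop, if_pos h, if_neg h0, hpr]
        rw [ih (pvUpd c t (c t - 1)) t, hud, hsv, pvSumTake_cons_pos _ _ _ h]
        ring
      · have h0 : ¬ (pvUpd c t 0 t > 0) := by simp [pvUpd]
        simp only [pvFloop, if_neg h, if_neg h0, hpr]
        rw [ih c t, pvSumTake_nonpos (c t) _ (by omega),
            pvSumTake_nonpos (c t) _ (by omega)]
    · have hpr : pvPrices s ((t, p) :: r) = pvPrices s r := by
        simp [pvPrices, hts]
      have hut : pvUpd c s 0 t = c t := by simp [pvUpd, hts]
      by_cases h : c t > 0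
      · have hcomm : pvUpd (pvUpd c t (c t - 1)) s 0 = pvUpd (pvUpd c s 0) t (c t - 1) := by
          funext x
          by_cases hx : x = s
          · simp [pvUpd, hx, Ne.symm hts]
          · by_cases hx' : x = t <;> simp [pvUpd, hx, hx', hts]
        have hcs : pvUpd c t (c t - 1) s = c s := by simp [pvUpd, Ne.symm hts]
        simp only [pvFloop, if_pos h, hpr, hut]
        rw [ih (pvUpd c t (c t - 1)) s, hcomm, hcs]
        ring
      · simp only [pvFloop, if_neg h, hpr, hut]
        exact ih c s
    
theorem pvFloop_zero (orders : List (Int × Int)) :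
    ∀ (c : Int → Int), (∀ s, c s ≤ 0) → pvFloop c orders = 0 := by
  induction orders with
  | nil => intro c _; rfl
  | cons q r ih =>
    intro c hc
    obtain ⟨t, p⟩ := q
    have : ¬ (c t > 0) := by have := hc t; omega
    simp only [pvFloop, if_neg this]
    exact ih c hc

theorem pvFloop_main (K : List Int) :
    ∀ (c : Int → Int) (orders : List (Int × Int)), K.Nodup → (∀ s, s ∉ K → c s ≤ 0) →
      pvFloop c orders = (K.map (fun s => pvSumTake (c s) (pvPrices s orders))).sum := by
  induction K with
  | nil =>
    intro c orders _ hz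
    simpa using pvFloop_zero orders c (fun s => hz s (List.not_mem_nil))
  | cons k K ih =>
    intro c orders hnd hz
    have hnd' : K.Nodup := hnd.of_cons
    have hkK : k ∉ K := by
      intro hk; exact (List.nodup_cons.mp hnd).1 hk
    have hz' : ∀ s, s ∉ K → pvUpd c k 0 s ≤ 0 := by
      intro s hs
      by_cases hsk : s = k
      · simp [pvUpd, hsk]
      · have : s ∉ k :: K := by simp [hsk, hs]
        simpa [pvUpd, hsk] using hz s this
    rw [pvFloop_split orders c k, ih (pvUpd c k 0) orders hnd' hz']
    have hmap : K.map (fun s => pvSumTake (pvUpd c k 0 s) (pvPrices s orders))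
        = K.map (fun s => pvSumTake (c s) (pvPrices s orders)) := by
      apply List.map_congr_left
      intro s hs
      have hsk : s ≠ k := fun h => hkK (h ▸ hs)
      simp [pvUpd, hsk]
    rw [hmap]
    simp

theorem pvAlt_eq (items_list : List Int) (order_list : List (Int × Int)) :
    get_raghu_earnings_alt items_list order_list
      = ((PySem.Set.ofList items_list).map
          (fun s => pvSumTake ((items_list.count s : Int)) (pvPrices s order_list))).sum := by
  unfold get_raghu_earnings_alt
  rw [PySem.List.foldl_add, PySem.Dict.items_counter]
  simp only [List.map_map, zero_add]
  congr 1
  apply List.map_congr_left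
  intro s _
  simp [pvPrices, pvSumTake, PySem.List.slice_to_natCast]

-- ===== VERDICT (by name: the statement is the Claim_ definition above) =====
theorem get_raghu_earnings_spec : Claim_equal_get_raghu_earnings := by
  intro items_list order_list _
  unfold Spec_get_raghu_earnings
  unfold get_raghu_earnings
  rw [pvFloop_A, pvAlt_eq]
  have hc : (fun s => (PySem.Dict.counter items_list).getD s 0)
      = fun s => (items_list.count s : Int) := by
    funext s; exact PySem.Dict.getD_counter items_list s
  rw [hc, pvFloop_main (PySem.Set.ofList items_list) _ order_list
        (PySem.Set.nodup_ofList items_list)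
        (by intro s hs
            rw [List.count_eq_zero.mpr (by simpa [PySem.Set.mem_ofList] using hs)]
            simp)]
  simp
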